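-- pv_equiv track=rewrite | github.com/steevelaquitaine/spikebias | src/nodes/utils.py | standardize_layers
-- ===== SOURCE A (Python) =====
-- def standardize_layers(layers: list):
--     layers = ["L1" if w == "1" else w for w in layers]
--     layers = ["L2/3" if w == "3" or w == "2" else w for w in layers]
--     layers = ["L2/3" if w == "L2_3" else w for w in layers]
--     layers = ["L2/3" if w == "L2" else w for w in layers]
--     layers = ["L2/3" if w == "L3" else w for w in layers]
--     layers = ["L4" if w == "4" else w for w in layers]
--     layers = ["L5" if w == "5" else w for w in layers]
--     layers = ["L6" if w == "6" else w for w in layers]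
--     layers = ["Out" if w == "WM" else w for w in layers]
--     return layers
-- ===== SOURCE B (Python) =====
-- _LAYER_MAP = {
--     "1": "L1", "2": "L2/3", "3": "L2/3", "L2_3": "L2/3", "L2": "L2/3",
--     "L3": "L2/3", "4": "L4", "5": "L5", "6": "L6", "WM": "Out",
-- }
--
-- def standardize_layers(layers: list):
--     return [_LAYER_MAP.get(w, w) for w in layers]
-- ===== Notes on version B (the rewrite author's own statement) =====
-- stated objective: simpler
-- what changed: Replaces nine successive full-list rewrite passes with a single table-driven pass over one source-to-target dict (the substitutions are non-chaining, so one pass suffices).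
import Mathlib
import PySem

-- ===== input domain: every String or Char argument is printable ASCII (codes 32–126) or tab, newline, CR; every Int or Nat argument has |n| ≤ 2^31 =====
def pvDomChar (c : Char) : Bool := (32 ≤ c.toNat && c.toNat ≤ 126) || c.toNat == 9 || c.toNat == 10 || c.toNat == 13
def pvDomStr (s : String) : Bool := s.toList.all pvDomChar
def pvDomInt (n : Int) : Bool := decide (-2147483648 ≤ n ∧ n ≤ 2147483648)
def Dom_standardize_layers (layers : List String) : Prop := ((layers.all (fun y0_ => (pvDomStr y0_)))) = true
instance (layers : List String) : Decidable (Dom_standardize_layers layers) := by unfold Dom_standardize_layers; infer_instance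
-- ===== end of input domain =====

-- B replaces A's nine successive full-list rewrite passes with a single table-driven pass
-- over one source→target dict (objective: simpler; the substitutions are non-chaining).

-- ===== PORT A =====
-- Each list comprehension pass of A is one named step, applied in A's order.
def passA1 (w : String) : String := if w = "1" then "L1" else w
def passA2 (w : String) : String := if w = "3" ∨ w = "2" then "L2/3" else w
def passA3 (w : String) : String := if w = "L2_3" then "L2/3" else w
def passA4 (w : String) : String := if w = "L2" then "L2/3" else w
def passA5 (w : String) : String := if w = "L3" then "L2/3" else w
def passA6 (w : String) : String := if w = "4" then "L4" else w
def passA7 (w : String) : String := if w = "5" then "L5" else w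
def passA8 (w : String) : String := if w = "6" then "L6" else w
def passA9 (w : String) : String := if w = "WM" then "Out" else w

def standardize_layers (layers : List String) : List String :=
  let layers := layers.map passA1
  let layers := layers.map passA2
  let layers := layers.map passA3
  let layers := layers.map passA4
  let layers := layers.map passA5
  let layers := layers.map passA6
  let layers := layers.map passA7
  let layers := layers.map passA8
  let layers := layers.map passA9
  layers

-- ===== PORT B =====
def layerMap : PySem.Dict String String :=
  PySem.Dict.ofList [("1", "L1"), ("2", "L2/3"), ("3", "L2/3"), ("L2_3", "L2/3"),
    ("L2", "L2/3"), ("L3", "L2/3"), ("4", "L4"), ("5", "L5"), ("6", "L6"), ("WM", "Out")]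

def standardize_layers_alt (layers : List String) : List String :=
  layers.map (fun w => layerMap.getD w w)

-- ===== PRECONDITION & SPEC =====
def Spec_standardize_layers (layers : List String) (out : List String) : Prop := out = standardize_layers_alt layers
instance (layers : List String) (out : List String) : Decidable (Spec_standardize_layers layers out) := by unfold Spec_standardize_layers; infer_instance

-- ===== CLAIM (what is proved, stated in full; the proofs are below) =====
def Claim_equal_standardize_layers : Prop := ∀ (layers : List String), Dom_standardize_layers layers → Spec_standardize_layers layers (standardize_layers layers)

-- ===== LEMMAS AND PROOFS =====
theorem standardize_elem (w : String) :
    passA9 (passA8 (passA7 (passA6 (passA5 (passA4 (passA3 (passA2 (passA1 w)))))))) =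
      layerMap.getD w w := by
  by_cases h1 : w = "1"; · subst h1; rfl
  by_cases h2 : w = "2"; · subst h2; rfl
  by_cases h3 : w = "3"; · subst h3; rfl
  by_cases h4 : w = "L2_3"; · subst h4; rfl
  by_cases h5 : w = "L2"; · subst h5; rfl
  by_cases h6 : w = "L3"; · subst h6; rfl
  by_cases h7 : w = "4"; · subst h7; rfl
  by_cases h8 : w = "5"; · subst h8; rfl
  by_cases h9 : w = "6"; · subst h9; rfl
  by_cases h10 : w = "WM"; · subst h10; rfl
  simp only [passA1, passA2, passA3, passA4, passA5, passA6, passA7, passA8, passA9,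
    layerMap, PySem.Dict.ofList, PySem.Dict.update, List.foldl,
    PySem.Dict.getD_insert, PySem.Dict.getD_empty,
    if_neg h1, if_neg h2, if_neg h3, if_neg h4, if_neg h5, if_neg h6, if_neg h7,
    if_neg h8, if_neg h9, if_neg h10, if_neg (by simp [h2, h3] : ¬(w = "3" ∨ w = "2"))]

theorem standardize_aux (layers : List String) :
    standardize_layers layers = standardize_layers_alt layers := by
  unfold standardize_layers standardize_layers_alt
  simp only [List.map_map]
  apply List.map_congr_left
  intro w _
  simp only [Function.comp_apply]
  exact standardize_elem w

theorem standardize_layers_spec : Claim_equal_standardize_layers := by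
  intro layers _
  exact standardize_aux layers
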